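-- pv_equiv track=rewrite | github.com/KorenevaIV/belhard35d | 6/6.7.py | sum_neighbor
-- ===== SOURCE A (Python) =====
-- def sum_neighbor(numbers):
--     result = []
--     for i in range(len(numbers)):
--         if i < len(numbers) - 1:
--             result.append(numbers[i-1] + numbers[i+1])
--         else:
--             result.append(numbers[i-1] + numbers[0])
--     return result
-- ===== SOURCE B (Python) =====
-- def sum_neighbor(numbers):
--     prev = numbers[-1:] + numbers[:-1]
--     nxt = numbers[1:] + numbers[:1]
--     return [p + q for p, q in zip(prev, nxt)]
-- ===== Notes on version B (the rewrite author's own statement) =====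
-- stated objective: idiomatic
-- what changed: Replaces the per-index loop with its branch and negative/modular index arithmetic by building the two cyclic rotations of the list (predecessors and successors) and adding them pairwise with zip.
import Mathlib
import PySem

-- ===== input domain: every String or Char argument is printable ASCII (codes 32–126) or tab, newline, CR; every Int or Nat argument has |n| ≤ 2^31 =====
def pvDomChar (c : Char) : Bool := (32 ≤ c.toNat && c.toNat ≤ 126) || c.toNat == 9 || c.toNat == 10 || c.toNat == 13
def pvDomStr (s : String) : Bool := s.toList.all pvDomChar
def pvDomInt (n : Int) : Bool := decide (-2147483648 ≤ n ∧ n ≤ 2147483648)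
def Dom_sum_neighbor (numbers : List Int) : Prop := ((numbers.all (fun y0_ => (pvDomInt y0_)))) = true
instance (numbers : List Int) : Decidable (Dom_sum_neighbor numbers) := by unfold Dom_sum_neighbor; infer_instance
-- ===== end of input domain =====

-- B replaces A's per-index branch and negative-index arithmetic by adding the two
-- cyclic rotations of the list pairwise (idiomatic shift-and-zip decomposition).

-- ===== PORT A =====
def sum_neighbor (numbers : List Int) : List Int :=
  (PySem.List.pyRange 0 (numbers.length : Int) 1).foldl
    (fun result i =>
      if i < (numbers.length : Int) - 1 then
        result ++ [PySem.List.pyGetD numbers (i - 1) 0 + PySem.List.pyGetD numbers (i + 1) 0]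
      else
        result ++ [PySem.List.pyGetD numbers (i - 1) 0 + PySem.List.pyGetD numbers 0 0]) []

-- ===== PORT B =====
def sum_neighbor_alt (numbers : List Int) : List Int :=
  let prev := PySem.List.slice numbers (some (-1)) none ++ PySem.List.slice numbers none (some (-1))
  let nxt := PySem.List.slice numbers (some 1) none ++ PySem.List.slice numbers none (some 1)
  List.zipWith (fun p q => p + q) prev nxt

-- ===== PRECONDITION & SPEC =====
def Spec_sum_neighbor (numbers : List Int) (out : List Int) : Prop := out = sum_neighbor_alt numbers
instance (numbers : List Int) (out : List Int) : Decidable (Spec_sum_neighbor numbers out) := by unfold Spec_sum_neighbor; infer_instance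

-- ===== CLAIM (what is proved, stated in full; the proofs are below) =====
def Claim_equal_sum_neighbor : Prop := ∀ (numbers : List Int), Dom_sum_neighbor numbers → Spec_sum_neighbor numbers (sum_neighbor numbers)

-- ===== LEMMAS AND PROOFS =====

theorem sum_neighbor_eq_map (xs : List Int) :
    sum_neighbor xs =
      (List.range xs.length).map (fun (k : Nat) =>
        if (k : Int) < (xs.length : Int) - 1 then
          PySem.List.pyGetD xs ((k : Int) - 1) 0 + PySem.List.pyGetD xs ((k : Int) + 1) 0
        else
          PySem.List.pyGetD xs ((k : Int) - 1) 0 + PySem.List.pyGetD xs 0 0) := by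
  unfold sum_neighbor
  have hbody : ∀ (acc : List Int) (i : Int),
      (if i < (xs.length : Int) - 1 then
        acc ++ [PySem.List.pyGetD xs (i - 1) 0 + PySem.List.pyGetD xs (i + 1) 0]
      else
        acc ++ [PySem.List.pyGetD xs (i - 1) 0 + PySem.List.pyGetD xs 0 0]) =
      acc ++ [if i < (xs.length : Int) - 1 then
        PySem.List.pyGetD xs (i - 1) 0 + PySem.List.pyGetD xs (i + 1) 0
      else
        PySem.List.pyGetD xs (i - 1) 0 + PySem.List.pyGetD xs 0 0] := by
    intro acc i; split <;> rfl
  simp only [hbody, PySem.List.foldl_append_singleton_eq_map, List.nil_append]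
  rw [PySem.List.pyRange_zero_natCast, List.map_map]
  simp [Function.comp]

theorem key (xs : List Int) : sum_neighbor xs = sum_neighbor_alt xs := by
  rcases xs with _ | ⟨x, rest⟩
  · rfl
  · set xs := x :: rest with hxs
    have hne : xs ≠ [] := by simp [hxs]
    have hn : 0 < xs.length := by simp [hxs]
    rw [sum_neighbor_eq_map]
    simp only [sum_neighbor_alt]
    have h1 : PySem.List.slice xs none (some (1:Int)) = xs.take 1 := by
      rw [PySem.List.slice_to xs (show (0:Int) ≤ 1 by norm_num)]
      norm_num
    rw [PySem.List.slice_from_neg_one, PySem.List.slice_to_neg_one,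
        PySem.List.slice_from_one, h1]
    have hL : xs.length = rest.length + 1 := by simp [hxs]
    apply List.ext_getElem
    · simp [hxs]
    · intro k hk hk'
      simp only [List.length_map, List.length_range] at hk
      simp only [List.getElem_map, List.getElem_range, List.getElem_zipWith]
      by_cases hk1 : k + 1 < xs.length
      · rw [if_pos (by omega)]
        rcases Nat.eq_zero_or_pos k with rfl | hk0
        · have e1 : PySem.List.pyGetD xs ((0:Nat) - 1 : Int) 0 = xs.getLast hne := by
            have c : ((0:Nat) - 1 : Int) = -1 := by norm_num
            rw [c, PySem.List.pyGetD_neg_one xs 0 hne]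
          have e2 : PySem.List.pyGetD xs ((0:Nat) + 1 : Int) 0 = xs[1]'(by omega) := by
            have c : ((0:Nat) + 1 : Int) = ((1:Nat) : Int) := by norm_num
            rw [c, PySem.List.pyGetD_natCast]
            exact List.getD_eq_getElem xs 0 (by omega)
          rw [e1, e2]
          have g1 : (List.drop (xs.length - 1) xs ++ xs.dropLast)[0]'(by simp; omega)
              = xs.getLast hne := by
            rw [List.getElem_append_left (by simp; omega)]
            simp [List.getElem_drop, List.getLast_eq_getElem]
          have g2 : (xs.tail ++ List.take 1 xs)[0]'(by simp; omega) = xs[1]'(by omega) := by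
            rw [List.getElem_append_left (by simp; omega)]
            simp [List.getElem_tail]
          rw [g1, g2]
        · have ck1 : ((k:Int) - 1) = ((k - 1 : Nat) : Int) := by omega
          have ck2 : ((k:Int) + 1) = ((k + 1 : Nat) : Int) := by omega
          have e1 : PySem.List.pyGetD xs ((k:Int) - 1) 0 = xs[k-1]'(by omega) := by
            rw [ck1, PySem.List.pyGetD_natCast]
            exact List.getD_eq_getElem xs 0 (by omega)
          have e2 : PySem.List.pyGetD xs ((k:Int) + 1) 0 = xs[k+1]'(by omega) := by
            rw [ck2, PySem.List.pyGetD_natCast]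
            exact List.getD_eq_getElem xs 0 (by omega)
          rw [e1, e2]
          have g1 : (List.drop (xs.length - 1) xs ++ xs.dropLast)[k]'(by simp; omega)
              = xs[k-1]'(by omega) := by
            rw [List.getElem_append_right (by simp; omega)]
            simp only [List.getElem_dropLast]
            congr 1
            simp
            omega
          have g2 : (xs.tail ++ List.take 1 xs)[k]'(by simp; omega) = xs[k+1]'(by omega) := by
            rw [List.getElem_append_left (by simp; omega)]
            simp [List.getElem_tail]
          rw [g1, g2]
      · -- k = xs.length - 1 : the else branch
        rw [if_neg (by omega)]
        have hk0 : k = xs.length - 1 := by omega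
        have e1 : PySem.List.pyGetD xs ((k:Int) - 1) 0 + PySem.List.pyGetD xs 0 0
            = PySem.List.pyGetD xs ((k:Int) - 1) 0 + xs[0]'(by omega) := by
          rw [PySem.List.pyGetD_zero, List.getD_eq_getElem xs 0 (by omega)]
        rw [e1]
        have g2 : (xs.tail ++ List.take 1 xs)[k]'(by simp; omega) = xs[0]'(by omega) := by
          rw [List.getElem_append_right (by simp; omega)]
          simp only [List.getElem_take]
          congr 1
          simp
          omega
        rw [g2]
        congr 1
        rcases Nat.eq_zero_or_pos k with rfl | hkp
        · have c : ((0:Nat) - 1 : Int) = -1 := by norm_num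
          rw [c, PySem.List.pyGetD_neg_one xs 0 hne]
          rw [List.getElem_append_left (by simp; omega)]
          simp [List.getElem_drop, List.getLast_eq_getElem]
        · have ck1 : ((k:Int) - 1) = ((k - 1 : Nat) : Int) := by omega
          rw [ck1, PySem.List.pyGetD_natCast]
          rw [List.getD_eq_getElem xs 0 (by omega)]
          rw [List.getElem_append_right (by simp; omega)]
          simp only [List.getElem_dropLast]
          congr 1
          simp
          omega

-- ===== VERDICT (by name: the statement is the Claim_ definition above) =====
theorem sum_neighbor_spec : Claim_equal_sum_neighbor := by
  intro numbers _
  exact key numbers
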